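-- pv_equiv track=rewrite | github.com/mirojs/graphrag-orchestration | graphrag-orchestration/app/services/cu_standard_ingestion_service.py | _build_section_path
-- ===== SOURCE A (Python) =====
-- from typing import Any, Dict, List, Union
--
-- def _build_section_path(paragraphs: List[Dict]) -> List[str]:
--     """Extract section hierarchy from paragraph roles."""
--     path = []
--     for para in paragraphs:
--         role = para.get("role", "")
--         content = para.get("content", "").strip()
--         if role == "title":
--             path = [content]  # Reset to top level
--         elif role == "sectionHeading":
--             if len(path) > 1:
--                 path[-1] = content  # Replace last subsection
--             else:
--                 path.append(content)
--     return path
-- ===== SOURCE B (Python) =====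
-- def _build_section_path(paragraphs):
--     """Extract section hierarchy from paragraph roles (anchor-based, no mutating path)."""
--     title_idx = None
--     for i, para in enumerate(paragraphs):
--         if para.get("role", "") == "title":
--             title_idx = i
--     if title_idx is not None:
--         title = paragraphs[title_idx].get("content", "").strip()
--         heads = [p.get("content", "").strip()
--                  for p in paragraphs[title_idx + 1:]
--                  if p.get("role", "") == "sectionHeading"]
--         return [title, heads[-1]] if heads else [title]
--     heads = [p.get("content", "").strip()
--              for p in paragraphs
--              if p.get("role", "") == "sectionHeading"]
--     if not heads:
--         return []
--     if len(heads) == 1: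
--         return [heads[0]]
--     return [heads[0], heads[-1]]
-- ===== Notes on version B (the rewrite author's own statement) =====
-- stated objective: alternative
-- what changed: B computes the path directly from anchors (index of the last 'title', then first/last 'sectionHeading' contents after it) instead of simulating A's mutating path list element by element.
import Mathlib
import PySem

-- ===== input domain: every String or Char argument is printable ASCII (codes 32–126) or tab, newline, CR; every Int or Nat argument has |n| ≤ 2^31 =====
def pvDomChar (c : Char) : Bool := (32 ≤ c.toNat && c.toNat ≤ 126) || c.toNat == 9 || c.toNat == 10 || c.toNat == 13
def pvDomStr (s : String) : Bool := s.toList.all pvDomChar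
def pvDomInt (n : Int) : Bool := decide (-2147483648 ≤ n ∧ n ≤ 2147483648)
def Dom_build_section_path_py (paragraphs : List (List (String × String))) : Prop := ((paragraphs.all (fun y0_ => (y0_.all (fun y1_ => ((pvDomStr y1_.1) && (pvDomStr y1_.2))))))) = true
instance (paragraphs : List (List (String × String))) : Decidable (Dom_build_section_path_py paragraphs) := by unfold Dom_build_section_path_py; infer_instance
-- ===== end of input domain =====

-- B is an alternative decomposition: it computes the path from anchors (last 'title', headings after it)
-- instead of simulating A's mutating path list; same cost, no speed claim.

-- para.get("role", "") — assoc-list first-match lookup with default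
def pvRole (d : List (String × String)) : String := (d.lookup "role").getD ""
-- para.get("content", "").strip()
def pvCont (d : List (String × String)) : String := PySem.Str.strip ((d.lookup "content").getD "")

-- ===== PORT A =====
def pvStepA (path : List String) (para : List (String × String)) : List String :=
  let role := pvRole para
  let content := pvCont para
  if role = "title" then [content]
  else if role = "sectionHeading" then
    if path.length > 1 then path.dropLast ++ [content]  -- path[-1] = content (exact: length > 1 here)
    else path ++ [content]
  else path

def build_section_path_py (paragraphs : List (List (String × String))) : List String :=
  paragraphs.foldl pvStepA []

-- ===== PORT B =====
-- the [ … for p in l if … ] comprehension of Source B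
def pvHeads (l : List (List (String × String))) : List String :=
  (l.filter (fun p => pvRole p = "sectionHeading")).map pvCont

-- the enumerate loop of Source B computing title_idx (last index whose role is "title")
def pvLastTitleIdx (ps : List (List (String × String))) : Option Int :=
  (PySem.List.enumerate ps).foldl
    (fun acc ip => if pvRole ip.2 = "title" then some ip.1 else acc) none

def build_section_path_py_alt (paragraphs : List (List (String × String))) : List String :=
  match pvLastTitleIdx paragraphs with
  | some i =>
    -- paragraphs[title_idx]: the index is always in range, `.getD []` only totalizes
    let title := pvCont ((PySem.List.pyGet? paragraphs i).getD [])
    let heads := pvHeads (PySem.List.slice paragraphs (some (i + 1)) none)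
    match heads.getLast? with
    | some h => [title, h]
    | none => [title]
  | none =>
    match pvHeads paragraphs with
    | [] => []
    | [h] => [h]
    | h :: t => [h, t.getLastD h]

-- ===== PRECONDITION & SPEC =====
def Spec_build_section_path_py (paragraphs : List (List (String × String))) (out : List String) : Prop := out = build_section_path_py_alt paragraphs
instance (paragraphs : List (List (String × String))) (out : List String) : Decidable (Spec_build_section_path_py paragraphs out) := by unfold Spec_build_section_path_py; infer_instance

-- ===== CLAIM (what is proved, stated in full; the proofs are below) =====
def Claim_equal_build_section_path_py : Prop := ∀ (paragraphs : List (List (String × String))), Dom_build_section_path_py paragraphs → Spec_build_section_path_py paragraphs (build_section_path_py paragraphs)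

-- ===== LEMMAS AND PROOFS =====

-- the value of A's loop from an accumulator of length ≤ 2, on a title-free list, as a function of the headings
def pvG (acc : List String) (hs : List String) : List String :=
  match hs, acc with
  | [], _ => acc
  | h :: t, [] => match t with | [] => [h] | _ :: _ => [h, t.getLastD h]
  | h :: t, a :: _ => [a, t.getLastD h]

def pvNoTitle (ps : List (List (String × String))) : Prop := ∀ p ∈ ps, pvRole p ≠ "title"

-- recursive index of the last "title" paragraph
theorem pvLastShift (t : List String) : ∀ (h d : String),
    (h :: t).getLastD d = t.getLastD h := by
  induction t with
  | nil => intro h d; rfl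
  | cons h' t' ih =>
    intro h d
    rw [List.getLastD_cons, List.getLastD_cons, ← ih h' h, List.getLastD_cons]

def pvIdxT (ps : List (List (String × String))) : Option Nat :=
  match ps with
  | [] => none
  | p :: rest =>
    match pvIdxT rest with
    | some j => some (j + 1)
    | none => if pvRole p = "title" then some 0 else none

theorem pvL1 (ps : List (List (String × String))) : ∀ acc : List String,
    acc.length ≤ 2 → pvNoTitle ps → ps.foldl pvStepA acc = pvG acc (pvHeads ps) := by
  induction ps with
  | nil => intro acc _ _; cases acc with
    | nil => rfl
    | cons a t => cases t <;> rfl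
  | cons p rest ih =>
    intro acc hlen hnt
    have hp : pvRole p ≠ "title" := hnt p (by simp)
    have hnt' : pvNoTitle rest := fun q hq => hnt q (by simp [hq])
    by_cases hh : pvRole p = "sectionHeading"
    · have hheads : pvHeads (p :: rest) = pvCont p :: pvHeads rest := by
        simp [pvHeads, hh]
      match acc, hlen with
      | [], _ =>
        have hstep : pvStepA [] p = [pvCont p] := by simp [pvStepA, hh]
        rw [List.foldl_cons, hstep, ih [pvCont p] (by simp) hnt', hheads]
        cases hs : pvHeads rest with
        | nil => simp [pvG]
        | cons h t => simp only [pvG]; rw [pvLastShift]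
      | [a], _ =>
        have hstep : pvStepA [a] p = [a, pvCont p] := by simp [pvStepA, hh]
        rw [List.foldl_cons, hstep, ih [a, pvCont p] (by simp) hnt', hheads]
        cases hs : pvHeads rest with
        | nil => simp [pvG]
        | cons h t => simp only [pvG]; rw [pvLastShift]
      | [a, b], _ =>
        have hstep : pvStepA [a, b] p = [a, pvCont p] := by simp [pvStepA, hh]
        rw [List.foldl_cons, hstep, ih [a, pvCont p] (by simp) hnt', hheads]
        cases hs : pvHeads rest with
        | nil => simp [pvG]
        | cons h t => simp only [pvG]; rw [pvLastShift]
      | a :: b :: c :: t, h => simp at h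
    · have hstep : pvStepA acc p = acc := by simp [pvStepA, hp, hh]
      have hheads : pvHeads (p :: rest) = pvHeads rest := by simp [pvHeads, hh]
      rw [List.foldl_cons, hstep, ih acc hlen hnt', hheads]

theorem pvL4none (ps : List (List (String × String))) (h : pvIdxT ps = none) : pvNoTitle ps := by
  induction ps with
  | nil => intro p hp; simp at hp
  | cons p rest ih =>
    intro q hq
    unfold pvIdxT at h
    cases hr : pvIdxT rest with
    | some j => rw [hr] at h; simp at h
    | none =>
      rw [hr] at h
      simp only at h
      split at h
      · simp at h
      · rcases List.mem_cons.mp hq with rfl | hq'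
        · assumption
        · exact ih hr q hq'

theorem pvL4lt (ps : List (List (String × String))) (j : Nat) (h : pvIdxT ps = some j) :
    j < ps.length := by
  induction ps generalizing j with
  | nil => simp [pvIdxT] at h
  | cons p rest ih =>
    unfold pvIdxT at h
    cases hr : pvIdxT rest with
    | some j' =>
      rw [hr] at h
      simp only [Option.some.injEq] at h
      subst h
      have := ih j' hr
      simp; omega
    | none =>
      rw [hr] at h
      simp only at h
      split at h
      · simp only [Option.some.injEq] at h; subst h; simp
      · simp at h

theorem pvL3 (ps : List (List (String × String))) : ∀ (k : Int) (acc : Option Int),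
    (PySem.List.enumerate ps k).foldl
      (fun acc ip => if pvRole ip.2 = "title" then some ip.1 else acc) acc =
    (match pvIdxT ps with
     | some j => some (k + j)
     | none => acc) := by
  induction ps with
  | nil => intro k acc; simp [PySem.List.enumerate_nil, pvIdxT]
  | cons p rest ih =>
    intro k acc
    rw [PySem.List.enumerate_cons, List.foldl_cons, ih (k + 1)]
    simp only [pvIdxT]
    cases hr : pvIdxT rest with
    | some j =>
      simp only [Option.some.injEq]
      push_cast
      ring
    | none =>
      by_cases ht : pvRole p = "title" <;> simp [ht]

theorem pvL5 (ps : List (List (String × String))) : ∀ (acc : List String) (j : Nat),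
    pvIdxT ps = some j →
    ps.foldl pvStepA acc = pvG [pvCont (ps.getD j [])] (pvHeads (ps.drop (j + 1))) := by
  induction ps with
  | nil => intro acc j h; simp [pvIdxT] at h
  | cons p rest ih =>
    intro acc j h
    unfold pvIdxT at h
    cases hr : pvIdxT rest with
    | some j' =>
      rw [hr] at h
      simp only [Option.some.injEq] at h
      subst h
      rw [List.foldl_cons, ih (pvStepA acc p) j' hr]
      simp [List.drop_succ_cons]
    | none =>
      rw [hr] at h
      simp only at h
      split at h
      next ht =>
        simp only [Option.some.injEq] at h
        subst h
        rw [List.foldl_cons]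
        have hstep : pvStepA acc p = [pvCont p] := by simp [pvStepA, ht]
        rw [hstep, pvL1 rest [pvCont p] (by simp) (pvL4none rest hr)]
        simp
      next => simp at h

-- ===== VERDICT (by name: the statement is the Claim_ definition above) =====
theorem build_section_path_py_spec : Claim_equal_build_section_path_py := by
  intro ps _
  unfold Spec_build_section_path_py build_section_path_py build_section_path_py_alt pvLastTitleIdx
  rw [pvL3 ps 0 none]
  cases hr : pvIdxT ps with
  | none =>
    simp only
    rw [pvL1 ps [] (by simp) (pvL4none ps hr)]
    cases hs : pvHeads ps with
    | nil => rfl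
    | cons h t => cases t <;> simp [pvG]
  | some j =>
    simp only
    have hlt := pvL4lt ps j hr
    rw [pvL5 ps [] j hr]
    have hget : PySem.List.pyGet? ps ((0 : Int) + (j : Int)) = some (ps.getD j []) := by
      rw [zero_add, PySem.List.pyGet?_natCast]
      rw [List.getElem?_eq_getElem hlt, List.getD_eq_getElem ps [] hlt]
    rw [hget]
    have hslice : PySem.List.slice ps (some ((0 : Int) + (j : Int) + 1)) none = ps.drop (j + 1) := by
      have : ((0 : Int) + (j : Int) + 1) = ((j + 1 : Nat) : Int) := by push_cast; ring
      rw [this, PySem.List.slice_from_natCast]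
    rw [hslice]
    cases hs : pvHeads (ps.drop (j + 1)) with
    | nil => rfl
    | cons h t =>
      simp only [pvG]
      rw [List.getLast?_cons]
      simp [List.getLastD_eq_getLast?]
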